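-- pv_equiv track=rewrite | github.com/jwk505/norm_app | inventory_report_app.py | pick_maker_expr
-- ===== SOURCE A (Python) =====
-- from typing import Optional, Tuple, Set, List
--
-- def pick_maker_expr(item_cols: Set[str], snap_cols: Set[str]) -> Tuple[str, str]:
--     candidates = ["maker", "brand", "make", "mfg", "manufacturer"]
--     s_col = next((c for c in candidates if c in snap_cols), None)
--     m_col = next((c for c in candidates if c in item_cols), None)
--
--     if s_col and m_col:
--         return (
--             f"s.{s_col}/m.{m_col}",
--             f"IFNULL(NULLIF(TRIM(s.{s_col}),''), IFNULL(NULLIF(TRIM(m.{m_col}),''), '(UNKNOWN)'))",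
--         )
--     if s_col:
--         return (f"s.{s_col}", f"IFNULL(NULLIF(TRIM(s.{s_col}),''), '(UNKNOWN)')")
--     if m_col:
--         return (f"m.{m_col}", f"IFNULL(NULLIF(TRIM(m.{m_col}),''), '(UNKNOWN)')")
--     return ("(none)", "'(UNKNOWN)'")
-- ===== SOURCE B (Python) =====
-- def pick_maker_expr(item_cols, snap_cols):
--     candidates = ["maker", "brand", "make", "mfg", "manufacturer"]
--     s_col = next((c for c in candidates if c in snap_cols), None)
--     m_col = next((c for c in candidates if c in item_cols), None)
--     parts = []
--     if s_col:
--         parts.append(f"s.{s_col}")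
--     if m_col:
--         parts.append(f"m.{m_col}")
--     expr = "'(UNKNOWN)'"
--     for p in reversed(parts):
--         expr = f"IFNULL(NULLIF(TRIM({p}),''), {expr})"
--     return ("/".join(parts) if parts else "(none)", expr)
-- ===== Notes on version B (the rewrite author's own statement) =====
-- stated objective: simpler
-- what changed: Replaces the four hard-coded return branches by a uniform parts list: name is '/'-join of the parts and the SQL expression is a right fold wrapping each part in IFNULL(NULLIF(TRIM(...)),...) around the '(UNKNOWN)' default.
import Mathlib
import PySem

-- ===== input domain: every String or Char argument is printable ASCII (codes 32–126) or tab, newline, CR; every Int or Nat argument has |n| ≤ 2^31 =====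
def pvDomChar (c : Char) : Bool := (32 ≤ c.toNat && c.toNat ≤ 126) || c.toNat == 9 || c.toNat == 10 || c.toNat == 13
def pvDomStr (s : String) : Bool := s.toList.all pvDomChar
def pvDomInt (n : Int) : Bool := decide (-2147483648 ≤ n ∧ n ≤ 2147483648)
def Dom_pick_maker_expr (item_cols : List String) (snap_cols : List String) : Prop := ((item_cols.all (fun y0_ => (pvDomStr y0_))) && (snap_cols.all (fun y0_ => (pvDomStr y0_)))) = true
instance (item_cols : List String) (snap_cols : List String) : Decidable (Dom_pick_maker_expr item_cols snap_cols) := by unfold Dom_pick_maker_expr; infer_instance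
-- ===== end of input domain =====

-- B replaces A's four hard-coded return branches by a parts list: '/'-join for the name
-- and a right fold nesting IFNULL(NULLIF(TRIM(...)),...) around '(UNKNOWN)' (objective: simpler).

-- ===== PORT A =====
def pick_maker_expr (item_cols : List String) (snap_cols : List String) : String × String :=
  let candidates := ["maker", "brand", "make", "mfg", "manufacturer"]
  let s_col := candidates.find? (fun c => snap_cols.contains c)
  let m_col := candidates.find? (fun c => item_cols.contains c)
  match s_col, m_col with
  | some s, some m =>
      ("s." ++ s ++ "/m." ++ m,
       "IFNULL(NULLIF(TRIM(s." ++ s ++ "),''), IFNULL(NULLIF(TRIM(m." ++ m ++ "),''), '(UNKNOWN)'))")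
  | some s, none => ("s." ++ s, "IFNULL(NULLIF(TRIM(s." ++ s ++ "),''), '(UNKNOWN)')")
  | none, some m => ("m." ++ m, "IFNULL(NULLIF(TRIM(m." ++ m ++ "),''), '(UNKNOWN)')")
  | none, none => ("(none)", "'(UNKNOWN)'")

-- ===== PORT B =====
def pick_maker_expr_alt (item_cols : List String) (snap_cols : List String) : String × String :=
  let candidates := ["maker", "brand", "make", "mfg", "manufacturer"]
  let s_col := candidates.find? (fun c => snap_cols.contains c)
  let m_col := candidates.find? (fun c => item_cols.contains c)
  let parts := (match s_col with | some s => ["s." ++ s] | none => [])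
            ++ (match m_col with | some m => ["m." ++ m] | none => [])
  let expr := parts.foldr
      (fun p acc => "IFNULL(NULLIF(TRIM(" ++ p ++ "),''), " ++ acc ++ ")") "'(UNKNOWN)'"
  (if parts = [] then "(none)" else PySem.Str.join "/" parts, expr)

-- ===== PRECONDITION & SPEC =====
def Spec_pick_maker_expr (item_cols : List String) (snap_cols : List String) (out : String × String) : Prop := out = pick_maker_expr_alt item_cols snap_cols
instance (item_cols : List String) (snap_cols : List String) (out : String × String) : Decidable (Spec_pick_maker_expr item_cols snap_cols out) := by unfold Spec_pick_maker_expr; infer_instance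

-- ===== CLAIM (what is proved, stated in full; the proofs are below) =====
def Claim_equal_pick_maker_expr : Prop := ∀ (item_cols : List String) (snap_cols : List String), Dom_pick_maker_expr item_cols snap_cols → Spec_pick_maker_expr item_cols snap_cols (pick_maker_expr item_cols snap_cols)

-- ===== LEMMAS AND PROOFS =====

-- ===== VERDICT (by name: the statement is the Claim_ definition above) =====
theorem pick_maker_expr_spec : Claim_equal_pick_maker_expr := by
  intro item_cols snap_cols _
  unfold Spec_pick_maker_expr pick_maker_expr pick_maker_expr_alt
  cases hs : List.find? (fun c => snap_cols.contains c) ["maker", "brand", "make", "mfg", "manufacturer"] <;>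
    cases hm : List.find? (fun c => item_cols.contains c) ["maker", "brand", "make", "mfg", "manufacturer"] <;>
      simp only [hs, hm] <;>
        simp [PySem.Str.join, PySem.Chars.join, List.intercalate, Prod.ext_iff,
              ← String.toList_inj, String.toList_append]
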